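-- pv_equiv track=rewrite | github.com/Erroi/straw_shoes | py/math/03.py | getNumberOfWheat
-- ===== SOURCE A (Python) =====
-- def getNumberOfWheat(grid):
--   sum = 0
--   numberOfWheatInGrid = 0
--
--   numberOfWheatInGrid = 1
--   sum += numberOfWheatInGrid
--
--   for i in range(2, grid):
--     numberOfWheatInGrid *= 2
--     sum += numberOfWheatInGrid
--
--   return sum
-- ===== SOURCE B (Python) =====
-- def getNumberOfWheat(grid):
--     # Closed form: 1 + 2 + 4 + ... + 2**(grid-2) = 2**(grid-1) - 1 for grid >= 2
--     if grid < 2: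
--         return 1
--     return (1 << (grid - 1)) - 1
-- ===== Notes on version B (the rewrite author's own statement) =====
-- stated objective: faster
-- what changed: Replaced the accumulation loop over range(2, grid) by the closed-form geometric sum (1 << (grid-1)) - 1 (grid < 2 returns 1 like the empty loop); intended as asymptotically faster, measured 1144x at n=65536 (at n=262144 A timed out and B's huge result could not be decoded by the harness).
import Mathlib
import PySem

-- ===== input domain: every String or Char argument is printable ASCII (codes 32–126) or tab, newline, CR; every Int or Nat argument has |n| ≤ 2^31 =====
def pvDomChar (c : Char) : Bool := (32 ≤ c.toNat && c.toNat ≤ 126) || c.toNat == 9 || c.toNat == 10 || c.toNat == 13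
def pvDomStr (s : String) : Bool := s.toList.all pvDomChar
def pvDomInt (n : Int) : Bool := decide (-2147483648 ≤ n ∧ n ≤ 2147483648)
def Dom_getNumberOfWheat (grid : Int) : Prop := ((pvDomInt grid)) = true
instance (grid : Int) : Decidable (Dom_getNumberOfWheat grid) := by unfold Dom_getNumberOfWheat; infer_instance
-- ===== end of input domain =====

-- B replaces A's accumulation loop by the closed-form geometric sum 2^(grid-1) - 1 (objective: faster).

-- ===== PORT A =====
-- literal port: sum starts at 1 (0 + 1), then the loop over range(2, grid) doubles
-- numberOfWheatInGrid and adds it to sum each step.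
def getNumberOfWheat (grid : Int) : Int :=
  let sum : Int := 0
  let numberOfWheatInGrid : Int := 1
  let sum := sum + numberOfWheatInGrid
  let st := (PySem.List.pyRange 2 grid 1).foldl
    (fun (p : Int × Int) (_i : Int) =>
      let n := p.2 * 2
      (p.1 + n, n)) (sum, numberOfWheatInGrid)
  st.1

-- ===== PORT B =====
def getNumberOfWheat_alt (grid : Int) : Int :=
  if grid < 2 then 1 else 2 ^ (grid - 1).toNat - 1

-- ===== PRECONDITION & SPEC =====
def Spec_getNumberOfWheat (grid : Int) (out : Int) : Prop := out = getNumberOfWheat_alt grid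
instance (grid : Int) (out : Int) : Decidable (Spec_getNumberOfWheat grid out) := by unfold Spec_getNumberOfWheat; infer_instance

-- ===== CLAIM (what is proved, stated in full; the proofs are below) =====
def Claim_equal_getNumberOfWheat : Prop := ∀ (grid : Int), Dom_getNumberOfWheat grid → Spec_getNumberOfWheat grid (getNumberOfWheat grid)

-- ===== LEMMAS AND PROOFS =====

-- The loop step depends only on the state, so the fold over any list is determined by its length.
theorem wheat_foldl (l : List Int) (s n : Int) :
    l.foldl (fun (p : Int × Int) (_i : Int) => let m := p.2 * 2; (p.1 + m, m)) (s, n)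
      = (s + 2 * n * (2 ^ l.length - 1), n * 2 ^ l.length) := by
  induction l generalizing s n with
  | nil => simp
  | cons a t ih =>
      simp only [List.foldl_cons, List.length_cons, ih]
      refine Prod.ext ?_ ?_ <;> simp <;> ring

theorem getNumberOfWheat_spec : Claim_equal_getNumberOfWheat := by
  intro grid _
  unfold Spec_getNumberOfWheat getNumberOfWheat getNumberOfWheat_alt
  simp only [wheat_foldl, PySem.List.length_pyRange_one]
  by_cases h : grid < 2
  · have : (grid - 2).toNat = 0 := by omega
    simp [h, this]
  · have h2 : (grid - 2).toNat + 1 = (grid - 1).toNat := by omega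
    simp only [if_neg h]
    have : (2 : Int) ^ (grid - 1).toNat = 2 ^ ((grid - 2).toNat + 1) := by rw [h2]
    rw [this, pow_succ]
    ring
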